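-- pv_equiv track=rewrite | github.com/amyteq/tt_share | h09a/P10_v9r6_a5.py | brute_f_up_to
-- ===== SOURCE A (Python) =====
-- def brute_f_up_to(N):
--     import math
--     f = [0]*(N+1)
--     for n in range(6,N+1):
--         best = None
--         for a in range(1,n):
--             for b in range(a+1,n):
--                 c = n - a - b
--                 if c <= b: continue
--                 L = math.lcm(a,b,c)
--                 if best is None or L < best:
--                     best = L
--         f[n] = best
--     return f
-- ===== SOURCE B (Python) =====
-- def brute_f_up_to(N):
--     import math
--     best = [None] * (N + 1)
--     for a in range(1, N + 1):
--         for b in range(a + 1, N + 1):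
--             for c in range(b + 1, N - a - b + 1):
--                 s = a + b + c
--                 L = math.lcm(a, b, c)
--                 u = best[s]
--                 if u is None or L < u:
--                     best[s] = L
--     return [0 if v is None else v for v in best]
-- ===== Notes on version B (the rewrite author's own statement) =====
-- stated objective: alternative
-- what changed: Instead of re-enumerating all (a,b) pairs for every separate sum n (gather), B enumerates each valid triple a<b<c with a+b+c<=N exactly once and scatters its lcm into the bucket for its sum, keeping a running minimum per bucket.
import Mathlib
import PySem

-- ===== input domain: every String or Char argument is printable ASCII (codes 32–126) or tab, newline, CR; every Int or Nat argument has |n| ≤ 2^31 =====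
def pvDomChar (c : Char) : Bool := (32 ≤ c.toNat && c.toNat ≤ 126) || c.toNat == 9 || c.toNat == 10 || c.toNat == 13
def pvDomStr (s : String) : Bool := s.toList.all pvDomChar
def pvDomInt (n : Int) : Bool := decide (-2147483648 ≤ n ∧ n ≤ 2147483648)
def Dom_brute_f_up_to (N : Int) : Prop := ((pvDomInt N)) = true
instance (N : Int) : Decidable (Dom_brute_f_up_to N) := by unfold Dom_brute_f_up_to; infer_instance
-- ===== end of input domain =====

-- B replaces A's per-sum re-enumeration of all (a,b) pairs by a single pass over all
-- triples a<b<c with a+b+c≤N, scattering each lcm into its sum bucket.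

-- ===== PORT A =====
-- shared helper: math.lcm(a,b,c) (all arguments are ≥ 1 wherever either program calls it)
def pvLcm3 (a b c : Int) : Int := (Int.lcm (Int.lcm a b) c : Nat)

-- shared helper: 'if best is None or L < best: best = L' (both sources contain this line verbatim)
def pvMinUpd (o : Option Int) (L : Int) : Option Int :=
  match o with
  | none => some L
  | some v => if L < v then some L else some v

def brute_f_up_to (N : Int) : List (Option Int) :=
  (PySem.List.pyRange 6 (N+1)).foldl
    (fun f n =>
      f.set n.toNat
        ((PySem.List.pyRange 1 n).foldl
          (fun best a =>
            (PySem.List.pyRange (a+1) n).foldl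
              (fun best b =>
                let c := n - a - b
                if c ≤ b then best else pvMinUpd best (pvLcm3 a b c))
              best)
          none))
    (List.replicate (N+1).toNat (some 0))

-- ===== PORT B =====
def brute_f_up_to_alt (N : Int) : List (Option Int) :=
  ((PySem.List.pyRange 1 (N+1)).foldl
    (fun best a =>
      (PySem.List.pyRange (a+1) (N+1)).foldl
        (fun best b =>
          (PySem.List.pyRange (b+1) (N-a-b+1)).foldl
            (fun best c =>
              let s := a + b + c
              let L := pvLcm3 a b c
              match best.getD s.toNat none with
              | none => best.set s.toNat (some L)
              | some u => if L < u then best.set s.toNat (some L) else best)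
            best)
        best)
    (List.replicate (N+1).toNat none)).map
    (fun v => match v with | none => some 0 | some x => some x)

-- ===== PRECONDITION & SPEC =====
def Spec_brute_f_up_to (N : Int) (out : List (Option Int)) : Prop := out = brute_f_up_to_alt N
instance (N : Int) (out : List (Option Int)) : Decidable (Spec_brute_f_up_to N out) := by unfold Spec_brute_f_up_to; infer_instance

-- ===== CLAIM (what is proved, stated in full; the proofs are below) =====
def Claim_equal_brute_f_up_to : Prop := ∀ (N : Int), Dom_brute_f_up_to N → Spec_brute_f_up_to N (brute_f_up_to N)

-- ===== LEMMAS AND PROOFS =====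

-- proof-side vocabulary: triples, their sum, their lcm, the min-update fold step
def pvSum (t : Int × Int × Int) : Int := t.1 + t.2.1 + t.2.2
def pvL (t : Int × Int × Int) : Int := pvLcm3 t.1 t.2.1 t.2.2
def pvUpd (o : Option Int) (t : Int × Int × Int) : Option Int := pvMinUpd o (pvL t)

-- B's inner-loop body as a function of the whole triple
def pvStep (arr : List (Option Int)) (t : Int × Int × Int) : List (Option Int) :=
  match arr.getD (pvSum t).toNat none with
  | none => arr.set (pvSum t).toNat (some (pvL t))
  | some u => if pvL t < u then arr.set (pvSum t).toNat (some (pvL t)) else arr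

-- the triple list B enumerates
def pvListB (N : Int) : List (Int × Int × Int) :=
  (PySem.List.pyRange 1 (N+1)).flatMap (fun a =>
    (PySem.List.pyRange (a+1) (N+1)).flatMap (fun b =>
      (PySem.List.pyRange (b+1) (N-a-b+1)).map (fun c => (a,b,c))))

-- the triple list A's inner double loop enumerates for sum n
def pvListA (n : Int) : List (Int × Int × Int) :=
  (PySem.List.pyRange 1 n).flatMap (fun a =>
    (PySem.List.pyRange (a+1) n).flatMap (fun b =>
      if b < n - a - b then [(a, b, n - a - b)] else []))

theorem pvStep_length (arr : List (Option Int)) (t : Int × Int × Int) :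
    (pvStep arr t).length = arr.length := by
  unfold pvStep
  rcases h : arr.getD (pvSum t).toNat none with _ | u <;> simp
  split <;> simp

theorem foldl_pvStep_length (ts : List (Int × Int × Int)) (arr : List (Option Int)) :
    (ts.foldl pvStep arr).length = arr.length := by
  induction ts generalizing arr with
  | nil => rfl
  | cons t ts ih => rw [List.foldl_cons, ih, pvStep_length]

theorem pvStep_getD (arr : List (Option Int)) (t : Int × Int × Int) (k : Nat)
    (hs : 0 ≤ pvSum t) (hlt : (pvSum t).toNat < arr.length) :
    (pvStep arr t).getD k none =
      if pvSum t = (k : Int) then pvUpd (arr.getD k none) t else arr.getD k none := by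
  unfold pvStep pvUpd
  by_cases he : pvSum t = (k : Int)
  · have hik : (pvSum t).toNat = k := by omega
    rw [if_pos he, hik]
    rcases h : arr.getD k none with _ | u
    · simp [pvMinUpd, List.getD_eq_getElem?_getD, hik ▸ hlt]
    · simp only [pvMinUpd]
      split
      · simp [List.getD_eq_getElem?_getD, hik ▸ hlt]
      · exact h
  · have hik : (pvSum t).toNat ≠ k := by omega
    rw [if_neg he]
    split
    · simp [List.getD_eq_getElem?_getD, hik]
    · split
      · simp [List.getD_eq_getElem?_getD, hik]
      · rfl

theorem foldl_pvStep_getD (ts : List (Int × Int × Int)) (arr : List (Option Int)) (k : Nat)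
    (hk : k < arr.length) (H : ∀ t ∈ ts, 0 ≤ pvSum t ∧ (pvSum t).toNat < arr.length) :
    (ts.foldl pvStep arr).getD k none =
      ((ts.filter (fun t => pvSum t == (k : Int))).foldl pvUpd (arr.getD k none)) := by
  induction ts generalizing arr with
  | nil => rfl
  | cons t ts ih =>
    obtain ⟨hs, hlt⟩ := H t (List.mem_cons_self ..)
    rw [List.foldl_cons, List.filter_cons]
    have hk' : k < (pvStep arr t).length := by rw [pvStep_length]; exact hk
    have H' : ∀ u ∈ ts, 0 ≤ pvSum u ∧ (pvSum u).toNat < (pvStep arr t).length := by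
      intro u hu; rw [pvStep_length]; exact H u (List.mem_cons_of_mem _ hu)
    rw [ih (pvStep arr t) hk' H']
    by_cases he : pvSum t = (k : Int)
    · simp only [he, beq_self_eq_true, if_pos]
      rw [List.foldl_cons]
      congr 1
      rw [pvStep_getD arr t k hs hlt, if_pos he]
    · have : (pvSum t == (k : Int)) = false := by simp [he]
      rw [this]
      simp only [Bool.false_eq_true, if_false]
      congr 1
      rw [pvStep_getD arr t k hs hlt, if_neg he]

-- A's per-n inner double loop, named
def pvInner (n : Int) : Option Int :=
  (PySem.List.pyRange 1 n).foldl
    (fun best a =>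
      (PySem.List.pyRange (a+1) n).foldl
        (fun best b =>
          let c := n - a - b
          if c ≤ b then best else pvMinUpd best (pvLcm3 a b c))
        best)
    none

theorem A_eq (N : Int) :
    brute_f_up_to N =
      (PySem.List.pyRange 6 (N+1)).foldl (fun f n => f.set n.toNat (pvInner n))
        (List.replicate (N+1).toNat (some 0)) := rfl

-- B's nested loops are exactly the fold of pvStep over pvListB
theorem alt_core (N : Int) :
    brute_f_up_to_alt N =
      ((pvListB N).foldl pvStep (List.replicate (N+1).toNat none)).map
        (fun v => match v with | none => some 0 | some x => some x) := by
  unfold brute_f_up_to_alt pvListB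
  simp only [List.foldl_flatMap, List.foldl_map]
  rfl

-- A's inner double loop is the min-fold over pvListA
theorem innerA_eq (n : Int) : pvInner n = (pvListA n).foldl pvUpd none := by
  unfold pvInner pvListA
  simp only [List.foldl_flatMap]
  have hf : (fun (best : Option Int) (a : Int) =>
      List.foldl (fun best b =>
        let c := n - a - b
        if c ≤ b then best else pvMinUpd best (pvLcm3 a b c)) best (PySem.List.pyRange (a+1) n))
    = (fun (best : Option Int) (a : Int) =>
      List.foldl (fun acc b =>
        List.foldl pvUpd acc (if b < n - a - b then [(a, b, n - a - b)] else []))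
        best (PySem.List.pyRange (a+1) n)) := by
    funext best a
    have hg : (fun (acc : Option Int) (b : Int) =>
        let c := n - a - b
        if c ≤ b then acc else pvMinUpd acc (pvLcm3 a b c))
      = (fun (acc : Option Int) (b : Int) =>
        List.foldl pvUpd acc (if b < n - a - b then [(a, b, n - a - b)] else [])) := by
      funext acc b
      by_cases h : b < n - a - b
      · show (if n - a - b ≤ b then acc else pvMinUpd acc (pvLcm3 a b (n - a - b))) = _
        rw [if_neg (by omega), if_pos h]
        rfl
      · show (if n - a - b ≤ b then acc else pvMinUpd acc (pvLcm3 a b (n - a - b))) = _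
        rw [if_pos (by omega), if_neg h]
        rfl
    rw [hg]
  rw [hf]

theorem filter_beq_range (m j : Nat) :
    (List.range m).filter (fun k => k == j) = if j < m then [j] else [] := by
  induction m with
  | zero => simp
  | succ m ih =>
    rw [List.range_succ, List.filter_append, ih, List.filter_cons, List.filter_nil]
    by_cases h : j = m
    · subst h
      simp
    · have hb : (m == j) = false := beq_eq_false_iff_ne.mpr (Ne.symm h)
      rw [hb]
      simp only [Bool.false_eq_true, if_false, List.append_nil]
      rcases Nat.lt_or_ge j m with h2 | h2
      · rw [if_pos h2, if_pos (by omega)]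
      · rw [if_neg (by omega), if_neg (by omega)]

theorem filter_beq_pyRange (lo hi x : Int) :
    (PySem.List.pyRange lo hi).filter (fun c => c == x) =
      if lo ≤ x ∧ x < hi then [x] else [] := by
  rw [PySem.List.pyRange_one, List.filter_map]
  by_cases hlo : lo ≤ x
  · have hc : ((fun c => c == x) ∘ (fun k : Nat => lo + (k : Int))) = (fun k : Nat => k == (x - lo).toNat) := by
      funext k
      rw [Bool.eq_iff_iff]
      simp only [Function.comp, beq_iff_eq]
      omega
    rw [hc, filter_beq_range]
    by_cases h : (x - lo).toNat < (hi - lo).toNat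
    · rw [if_pos h, if_pos ⟨hlo, by omega⟩]
      simp only [List.map_cons, List.map_nil]
      congr 1
      omega
    · rw [if_neg h, if_neg (by omega)]
      simp
  · have hc : ∀ k ∈ List.range (hi - lo).toNat, ¬(((fun c => c == x) ∘ (fun k : Nat => lo + (k : Int))) k = true) := by
      intro k _
      simp only [Function.comp, beq_iff_eq]
      omega
    rw [List.filter_eq_nil_iff.mpr hc, if_neg (by omega), List.map_nil]

theorem mem_pvListB {N : Int} {t : Int × Int × Int} (ht : t ∈ pvListB N) :
    6 ≤ pvSum t ∧ pvSum t ≤ N := by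
  unfold pvListB at ht
  simp only [List.mem_flatMap, List.mem_map, PySem.List.mem_pyRange_one] at ht
  obtain ⟨a, ⟨ha1, ha2⟩, b, ⟨hb1, hb2⟩, c, ⟨hc1, hc2⟩, rfl⟩ := ht
  simp only [pvSum]
  constructor <;> omega

theorem filterB (N n : Int) (h6 : 6 ≤ n) (hN : n ≤ N) :
    (pvListB N).filter (fun t => pvSum t == n) = pvListA n := by
  unfold pvListB pvListA
  rw [List.filter_flatMap]
  have hbody : ∀ a b : Int, 1 ≤ a → a + 1 ≤ b →
      List.filter (fun t => pvSum t == n)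
        ((PySem.List.pyRange (b+1) (N-a-b+1)).map (fun c => (a, b, c)))
      = if b < n - a - b then [(a, b, n - a - b)] else [] := by
    intro a b _ _
    rw [List.filter_map]
    have hc : ((fun t => pvSum t == n) ∘ (fun c => (a, b, c))) = (fun c : Int => c == n - a - b) := by
      funext c
      rw [Bool.eq_iff_iff]
      simp only [Function.comp, pvSum, beq_iff_eq]
      omega
    rw [hc, filter_beq_pyRange]
    by_cases h : b < n - a - b
    · rw [if_pos ⟨by omega, by omega⟩, if_pos h]; rfl
    · rw [if_neg (by omega), if_neg h]; rfl
  have inner : ∀ a : Int, 1 ≤ a →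
      List.filter (fun t => pvSum t == n)
        ((PySem.List.pyRange (a+1) (N+1)).flatMap (fun b =>
          (PySem.List.pyRange (b+1) (N-a-b+1)).map (fun c => (a, b, c))))
      = (PySem.List.pyRange (a+1) n).flatMap (fun b =>
          if b < n - a - b then [(a, b, n - a - b)] else []) := by
    intro a ha
    rw [List.filter_flatMap]
    by_cases han : a + 1 ≤ n
    · rw [PySem.List.pyRange_one_append (a+1) n (N+1) han (by omega), List.flatMap_append]
      have h1 : List.flatMap (fun b =>
          List.filter (fun t => pvSum t == n)
            ((PySem.List.pyRange (b+1) (N-a-b+1)).map (fun c => (a, b, c))))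
          (PySem.List.pyRange (a+1) n)
          = (PySem.List.pyRange (a+1) n).flatMap (fun b =>
              if b < n - a - b then [(a, b, n - a - b)] else []) := by
        apply List.flatMap_congr
        intro b hb
        rw [PySem.List.mem_pyRange_one] at hb
        exact hbody a b ha hb.1
      have h2 : List.flatMap (fun b =>
          List.filter (fun t => pvSum t == n)
            ((PySem.List.pyRange (b+1) (N-a-b+1)).map (fun c => (a, b, c))))
          (PySem.List.pyRange n (N+1)) = [] := by
        rw [List.flatMap_eq_nil_iff]
        intro b hb
        rw [PySem.List.mem_pyRange_one] at hb
        rw [hbody a b ha (by omega), if_neg (by omega)]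
      rw [h1, h2, List.append_nil]
    · rw [PySem.List.pyRange_one_eq_nil (by omega : n ≤ a + 1)]
      rw [List.flatMap_nil, List.flatMap_eq_nil_iff]
      intro b hb
      rw [PySem.List.mem_pyRange_one] at hb
      rw [hbody a b ha (by omega), if_neg (by omega)]
  rw [PySem.List.pyRange_one_append 1 n (N+1) (by omega) (by omega), List.flatMap_append]
  have g1 : List.flatMap (fun a =>
      List.filter (fun t => pvSum t == n)
        ((PySem.List.pyRange (a+1) (N+1)).flatMap (fun b =>
          (PySem.List.pyRange (b+1) (N-a-b+1)).map (fun c => (a, b, c)))))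
      (PySem.List.pyRange 1 n)
      = (PySem.List.pyRange 1 n).flatMap (fun a =>
          (PySem.List.pyRange (a+1) n).flatMap (fun b =>
            if b < n - a - b then [(a, b, n - a - b)] else [])) := by
    apply List.flatMap_congr
    intro a ha
    rw [PySem.List.mem_pyRange_one] at ha
    exact inner a ha.1
  have g2 : List.flatMap (fun a =>
      List.filter (fun t => pvSum t == n)
        ((PySem.List.pyRange (a+1) (N+1)).flatMap (fun b =>
          (PySem.List.pyRange (b+1) (N-a-b+1)).map (fun c => (a, b, c)))))
      (PySem.List.pyRange n (N+1)) = [] := by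
    rw [List.flatMap_eq_nil_iff]
    intro a ha
    rw [PySem.List.mem_pyRange_one] at ha
    rw [inner a (by omega)]
    rw [PySem.List.pyRange_one_eq_nil (by omega : n ≤ a + 1), List.flatMap_nil]
  rw [g1, g2, List.append_nil]

theorem pvUpd_some (o : Option Int) (t : Int × Int × Int) : ∃ w, pvUpd o t = some w := by
  unfold pvUpd pvMinUpd
  cases o with
  | none => exact ⟨_, rfl⟩
  | some v =>
    dsimp only
    split
    · exact ⟨_, rfl⟩
    · exact ⟨_, rfl⟩

theorem foldl_pvUpd_some_aux (l : List (Int × Int × Int)) : ∀ (v : Int),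
    (l.foldl pvUpd (some v)).isSome := by
  induction l with
  | nil => intro v; rfl
  | cons t ts ih =>
    intro v
    rw [List.foldl_cons]
    obtain ⟨w, hw⟩ := pvUpd_some (some v) t
    rw [hw]
    exact ih w

theorem foldl_pvUpd_isSome (l : List (Int × Int × Int)) (h : l ≠ []) :
    (l.foldl pvUpd none).isSome := by
  cases l with
  | nil => exact absurd rfl h
  | cons t ts =>
    rw [List.foldl_cons]
    obtain ⟨w, hw⟩ := pvUpd_some none t
    rw [hw]
    exact foldl_pvUpd_some_aux ts w

theorem pvListA_ne_nil {n : Int} (h : 6 ≤ n) : pvListA n ≠ [] := by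
  apply List.ne_nil_of_mem (a := (1, 2, n - 3))
  unfold pvListA
  simp only [List.mem_flatMap, PySem.List.mem_pyRange_one]
  refine ⟨1, ⟨le_refl 1, by omega⟩, 2, ⟨by omega, by omega⟩, ?_⟩
  rw [if_pos (by omega : (2:Int) < n - 1 - 2)]
  simp only [List.mem_singleton, Prod.mk.injEq]
  refine ⟨trivial, trivial, by omega⟩

theorem foldl_set_getD (g : Int → Option Int) (l : List Int) (f : List (Option Int)) (k : Nat)
    (hnd : l.Nodup) (hpos : ∀ n ∈ l, 0 ≤ n) (hk : k < f.length) :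
    ((l.foldl (fun f n => f.set n.toNat (g n)) f).getD k none) =
      if (k : Int) ∈ l then g k else f.getD k none := by
  induction l generalizing f with
  | nil => simp
  | cons n l ih =>
    rw [List.foldl_cons]
    have hn0 : 0 ≤ n := hpos n (List.mem_cons_self ..)
    rw [ih (f.set n.toNat (g n)) (List.nodup_cons.mp hnd).2
      (fun m hm => hpos m (List.mem_cons_of_mem _ hm)) (by rw [List.length_set]; exact hk)]
    by_cases he : (k : Int) ∈ l
    · rw [if_pos he, if_pos (List.mem_cons_of_mem _ he)]
    · rw [if_neg he]
      by_cases hkn : (k : Int) = n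
      · rw [if_pos (List.mem_cons.mpr (Or.inl hkn))]
        have hnk : n.toNat = k := by omega
        rw [hnk, ← hkn]
        simp [List.getD_eq_getElem?_getD, hk]
      · rw [if_neg (fun hmem => (List.mem_cons.mp hmem).elim hkn he)]
        have hnk : n.toNat ≠ k := by omega
        simp [List.getD_eq_getElem?_getD, hnk]

theorem foldl_set_length (g : Int → Option Int) (l : List Int) (f : List (Option Int)) :
    (l.foldl (fun f n => f.set n.toNat (g n)) f).length = f.length := by
  induction l generalizing f with
  | nil => rfl
  | cons n l ih => rw [List.foldl_cons, ih, List.length_set]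

theorem bucketB (N : Int) (k : Nat) (hk : k < (N+1).toNat) :
    ((pvListB N).foldl pvStep (List.replicate (N+1).toNat none)).getD k none =
      ((pvListB N).filter (fun t => pvSum t == (k : Int))).foldl pvUpd none := by
  have hrep : (List.replicate (N+1).toNat (none : Option Int)).getD k none = none := by
    simp only [List.getD_eq_getElem?_getD, List.getElem?_replicate]
    split <;> rfl
  rw [foldl_pvStep_getD _ _ k (by simpa using hk) ?H, hrep]
  case H =>
    intro t ht
    obtain ⟨h6, hN⟩ := mem_pvListB ht
    refine ⟨by omega, ?_⟩
    simp only [List.length_replicate]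
    omega

-- ===== VERDICT (by name: the statement is the Claim_ definition above) =====
theorem brute_f_up_to_spec : Claim_equal_brute_f_up_to := by
  intro N _
  unfold Spec_brute_f_up_to
  rw [A_eq, alt_core]
  have hlenA : ((PySem.List.pyRange 6 (N+1)).foldl (fun f n => f.set n.toNat (pvInner n))
      (List.replicate (N+1).toNat (some 0))).length = (N+1).toNat := by
    rw [foldl_set_length]; simp
  have hlenB : (((pvListB N).foldl pvStep (List.replicate (N+1).toNat none)).map
      (fun v => match v with | none => some 0 | some x => some x)).length = (N+1).toNat := by
    rw [List.length_map, foldl_pvStep_length]; simp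
  apply List.ext_getElem (by rw [hlenA, hlenB])
  intro i h1 h2
  have hi : i < (N+1).toNat := by rwa [hlenA] at h1
  rw [← List.getD_eq_getElem _ none h1]
  rw [foldl_set_getD pvInner _ _ i (PySem.List.nodup_pyRange_one 6 (N+1))
    (fun n hn => by rw [PySem.List.mem_pyRange_one] at hn; omega) (by simpa using hi)]
  rw [List.getElem_map]
  have hcore : ((pvListB N).foldl pvStep (List.replicate (N+1).toNat none))[i]'(by rwa [List.length_map] at h2) =
      ((pvListB N).filter (fun t => pvSum t == (i : Int))).foldl pvUpd none := by
    rw [← List.getD_eq_getElem _ none, bucketB N i hi]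
  rw [hcore]
  by_cases h6 : (6 : Int) ≤ (i : Int)
  · rw [if_pos (by rw [PySem.List.mem_pyRange_one]; exact ⟨h6, by omega⟩)]
    rw [filterB N (i : Int) h6 (by omega)]
    rw [innerA_eq]
    obtain ⟨w, hw⟩ := Option.isSome_iff_exists.mp
      (foldl_pvUpd_isSome _ (pvListA_ne_nil h6))
    rw [hw]
  · rw [if_neg (by rw [PySem.List.mem_pyRange_one]; omega)]
    have hfil : (pvListB N).filter (fun t => pvSum t == (i : Int)) = [] := by
      rw [List.filter_eq_nil_iff]
      intro t ht
      have := (mem_pvListB ht).1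
      simp only [beq_iff_eq]
      omega
    rw [hfil, List.foldl_nil]
    simp [List.getD_eq_getElem?_getD, hi]
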